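-- pv_equiv track=rewrite | github.com/Jv131103/estudos_python | estudos2/remover_todos_especifico_lista.py | remover_todos_especificos_inplace
-- ===== SOURCE A (Python) =====
-- def remover_todos_especificos_inplace(lista, dado):
--     if not isinstance(lista, list):
--         raise TypeError("lista precisa ser do tipo list")
--
--     i = 0
--
--     while i <= len(lista) - 1:
--         if lista[i] == dado:
--             lista.pop(i)
--         else:
--             i += 1
--
--     return lista
-- ===== SOURCE B (Python) =====
-- def remover_todos_especificos_inplace(lista, dado):
--     if not isinstance(lista, list):
--         raise TypeError("lista precisa ser do tipo list")
--     # one-pass filter; slice assignment keeps the in-place mutation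
--     lista[:] = [x for x in lista if x != dado]
--     return lista
-- ===== Notes on version B (the rewrite author's own statement) =====
-- stated objective: faster
-- what changed: Replaced the quadratic while-loop that pops matching elements in place (each pop shifts the tail) with a single linear filtering pass whose result is written back via slice assignment.
import Mathlib
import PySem

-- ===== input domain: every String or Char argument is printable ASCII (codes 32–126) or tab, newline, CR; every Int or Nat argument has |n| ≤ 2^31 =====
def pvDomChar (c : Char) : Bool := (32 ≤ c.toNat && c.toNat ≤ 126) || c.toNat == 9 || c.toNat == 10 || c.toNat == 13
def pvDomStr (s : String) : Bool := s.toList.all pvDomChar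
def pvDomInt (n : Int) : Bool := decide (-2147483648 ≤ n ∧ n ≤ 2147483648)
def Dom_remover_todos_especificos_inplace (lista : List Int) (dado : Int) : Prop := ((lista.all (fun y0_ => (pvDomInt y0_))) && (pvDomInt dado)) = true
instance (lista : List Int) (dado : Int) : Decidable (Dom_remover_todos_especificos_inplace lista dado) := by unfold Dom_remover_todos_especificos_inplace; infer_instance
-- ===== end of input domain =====

-- B changes A's pop-in-a-while-loop (quadratic) into one linear filtering pass;
-- both mutate the argument list in Python, the equivalence is about the returned value.

-- ===== PORT A =====
-- A's while loop: state is the current list and index i; `lista.pop(i)` = eraseIdx.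
def pvLoopA (lista : List Int) (dado : Int) (i : Nat) : List Int :=
  if h : i < lista.length then
    if lista[i] == dado then
      pvLoopA (lista.eraseIdx i) dado i
    else
      pvLoopA lista dado (i + 1)
  else
    lista
termination_by lista.length - i
decreasing_by
  · simp [List.length_eraseIdx, h]; omega
  · omega

def remover_todos_especificos_inplace (lista : List Int) (dado : Int) : List Int :=
  pvLoopA lista dado 0

-- ===== PORT B =====
-- Source B: lista[:] = [x for x in lista if x != dado]; return lista
def remover_todos_especificos_inplace_alt (lista : List Int) (dado : Int) : List Int :=
  lista.filter (fun x => x != dado)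

-- ===== PRECONDITION & SPEC =====
def Spec_remover_todos_especificos_inplace (lista : List Int) (dado : Int) (out : List Int) : Prop := out = remover_todos_especificos_inplace_alt lista dado
instance (lista : List Int) (dado : Int) (out : List Int) : Decidable (Spec_remover_todos_especificos_inplace lista dado out) := by unfold Spec_remover_todos_especificos_inplace; infer_instance

-- ===== CLAIM (what is proved, stated in full; the proofs are below) =====
def Claim_equal_remover_todos_especificos_inplace : Prop := ∀ (lista : List Int) (dado : Int), Dom_remover_todos_especificos_inplace lista dado → Spec_remover_todos_especificos_inplace lista dado (remover_todos_especificos_inplace lista dado)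

-- ===== LEMMAS AND PROOFS =====
theorem pvEraseIdx_append (x : Int) (rs : List Int) :
    ∀ pre : List Int, (pre ++ x :: rs).eraseIdx pre.length = pre ++ rs := by
  intro pre
  induction pre with
  | nil => simp
  | cons p ps ih => simpa [List.eraseIdx] using ih

theorem pvGet_append (x : Int) (rs : List Int) (pre : List Int)
    (h : pre.length < (pre ++ x :: rs).length) :
    (pre ++ x :: rs)[pre.length] = x := by
  simp

theorem pvLoopA_eq (dado : Int) :
    ∀ (rest pre : List Int),
      pvLoopA (pre ++ rest) dado pre.length = pre ++ rest.filter (fun x => x != dado) := by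
  intro rest
  induction rest with
  | nil =>
      intro pre
      rw [pvLoopA]
      simp
  | cons x rs ih =>
      intro pre
      rw [pvLoopA]
      have hlen : pre.length < (pre ++ x :: rs).length := by simp
      rw [dif_pos hlen]
      by_cases hx : x = dado
      · subst hx
        simp only [pvGet_append, BEq.rfl, if_true, pvEraseIdx_append]
        rw [ih pre]
        simp [List.filter]
      · have hbeq : ((pre ++ x :: rs)[pre.length] == dado) = false := by
          simp [hx]
        rw [hbeq]
        simp only [Bool.false_eq_true, if_false]
        have h2 := ih (pre ++ [x])
        simp only [List.length_append, List.length_cons, List.length_nil] at h2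
        have : pre.length + 1 = pre.length + [x].length := by simp
        calc pvLoopA (pre ++ x :: rs) dado (pre.length + 1)
            = pvLoopA ((pre ++ [x]) ++ rs) dado (pre ++ [x]).length := by
              simp
          _ = (pre ++ [x]) ++ rs.filter (fun x => x != dado) := ih (pre ++ [x])
          _ = pre ++ (x :: rs).filter (fun x => x != dado) := by
              have : (x != dado) = true := by simp [hx]
              simp [List.filter, this]

-- ===== VERDICT (by name: the statement is the Claim_ definition above) =====
theorem remover_todos_especificos_inplace_spec : Claim_equal_remover_todos_especificos_inplace := by
  intro lista dado _
  show remover_todos_especificos_inplace lista dado = remover_todos_especificos_inplace_alt lista dado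
  have h := pvLoopA_eq dado lista []
  simpa [remover_todos_especificos_inplace, remover_todos_especificos_inplace_alt] using h
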